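-- pv_equiv track=rewrite | github.com/seungwontech/autopush | 프로그래머스/lv0/120904. 숫자 찾기/숫자 찾기.py | solution
-- ===== SOURCE A (Python) =====
-- def solution(num, k):
--     answer = 0
--     list_num = list(map(int, str(num)))
--
--     for i in list_num:
--         if i == k:
--             answer = list_num.index(i) + 1
--     if answer == 0:
--         answer = -1
--     return answer
-- ===== SOURCE B (Python) =====
-- def solution(num, k):
--     # Search for the digit character of k directly in str(num):
--     # a digit outside 0..9 can never occur, so answer -1 without scanning.
--     if 0 <= k <= 9:
--         pos = str(num).find(str(k))
--         if pos != -1: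
--             return pos + 1
--     return -1
-- ===== Notes on version B (the rewrite author's own statement) =====
-- stated objective: simpler
-- what changed: Instead of parsing every character of str(num) to an int, looping with repeated list.index rescans and a 0-sentinel fix-up, B does a single substring search str(num).find(str(k)), guarded by 0 <= k <= 9 since no digit can equal any other k.
import Mathlib
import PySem

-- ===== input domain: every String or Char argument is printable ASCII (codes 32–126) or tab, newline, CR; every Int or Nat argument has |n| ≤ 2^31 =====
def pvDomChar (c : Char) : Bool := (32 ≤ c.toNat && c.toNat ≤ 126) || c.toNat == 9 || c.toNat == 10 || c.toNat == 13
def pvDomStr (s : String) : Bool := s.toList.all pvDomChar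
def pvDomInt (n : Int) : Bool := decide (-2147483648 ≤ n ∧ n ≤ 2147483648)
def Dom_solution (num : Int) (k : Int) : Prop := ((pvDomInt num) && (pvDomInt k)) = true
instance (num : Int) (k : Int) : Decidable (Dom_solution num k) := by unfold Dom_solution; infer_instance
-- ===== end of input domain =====

-- B replaces A's per-character int() parse, loop with repeated list.index rescans and
-- sentinel fix-up by a single substring search str(num).find(str(k)); objective: simpler.

-- ===== PORT A =====
def solution (num : Int) (k : Int) : Int :=
  -- list_num = list(map(int, str(num))); int(c) raises ValueError on '-', so the
  -- none branch (excluded by Pre_solution) returns a junk value.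
  match (PySem.Int.toChars num).mapM (fun c => PySem.Int.ofChars? [c]) with
  | none => 0
  | some list_num =>
    let answer : Int := list_num.foldl
      (fun answer i =>
        if i == k then ((PySem.List.index? list_num i).getD 0 : Nat) + 1 else answer)
      0
    -- .index cannot raise here since i is a member; getD 0 is that unreachable branch
    if answer == 0 then (-1) else answer

-- ===== PORT B =====
def solution_alt (num : Int) (k : Int) : Int :=
  if 0 ≤ k ∧ k ≤ 9 then
    let pos := PySem.Str.find (PySem.Int.toStr num) (PySem.Int.toStr k)
    if pos ≠ -1 then pos + 1 else -1
  else -1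

-- ===== PRECONDITION & SPEC =====
-- Pre_ excludes num < 0, where A raises ValueError (int('-') on the sign character).
def Pre_solution (num : Int) (k : Int) : Prop := 0 ≤ num
instance (num : Int) (k : Int) : Decidable (Pre_solution num k) := by unfold Pre_solution; infer_instance
def pvWitness_solution : Int × Int := (29054, 5)

def Spec_solution (num : Int) (k : Int) (out : Int) : Prop := out = solution_alt num k
instance (num : Int) (k : Int) (out : Int) : Decidable (Spec_solution num k out) := by unfold Spec_solution; infer_instance

-- ===== CLAIM (what is proved, stated in full; the proofs are below) =====
def Claim_equal_solution : Prop := ∀ (num : Int) (k : Int), Dom_solution num k → Pre_solution num k → Spec_solution num k (solution num k)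

-- ===== LEMMAS AND PROOFS =====

-- integer value of a decimal digit character
def chVal (c : Char) : Int := (c.toNat : Int) - 48

-- every character str(n) produces for n ≥ 0 is a decimal digit character
theorem mem_toDigits_ten (n : Nat) : ∀ c ∈ Nat.toDigits 10 n, ∃ d : Nat, d < 10 ∧ c = Nat.digitChar d := by
  induction n using Nat.strong_induction_on with
  | _ n ih =>
    rw [Nat.toDigits_eq_if (by norm_num)]
    split_ifs with h
    · intro c hc
      simp only [List.mem_singleton] at hc
      exact ⟨n, h, hc⟩
    · intro c hc
      rcases List.mem_append.mp hc with hc | hc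
      · exact ih (n / 10) (Nat.div_lt_self (by omega) (by norm_num)) c hc
      · simp only [List.mem_singleton] at hc
        exact ⟨n % 10, Nat.mod_lt _ (by norm_num), hc⟩

theorem ofChars?_digitChar {d : Nat} (hd : d < 10) :
    PySem.Int.ofChars? [Nat.digitChar d] = some (d : Int) := by
  interval_cases d <;> decide

theorem chVal_digitChar {d : Nat} (hd : d < 10) : chVal (Nat.digitChar d) = (d : Int) := by
  interval_cases d <;> decide

theorem chVal_eq_iff {d : Nat} (hd : d < 10) {k : Int} (hk0 : 0 ≤ k) (hk9 : k ≤ 9) :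
    chVal (Nat.digitChar d) = k ↔ Nat.digitChar d = Nat.digitChar k.toNat := by
  obtain ⟨m, rfl⟩ := Int.eq_ofNat_of_zero_le hk0
  have hm : m < 10 := by omega
  constructor
  · intro h
    rw [chVal_digitChar hd] at h
    have : d = m := by exact_mod_cast h
    simp [this]
  · intro h
    interval_cases d <;> interval_cases m <;> simp_all <;> rfl

-- map(int, …) succeeds when every element parses
theorem mapM_eq_map {α β : Type} (f : α → Option β) (g : α → β) :
    ∀ (s : List α), (∀ c ∈ s, f c = some (g c)) → s.mapM f = some (s.map g) := by
  intro s
  induction s with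
  | nil => intro _; rfl
  | cons x t ih =>
    intro h
    rw [List.mapM_cons, h x (by simp), ih (fun c hc => h c (by simp [hc]))]
    rfl

-- A's loop: the accumulator ends at g k if k occurs, else at the initial value
theorem foldl_last_hit (k : Int) (g : Int → Int) :
    ∀ (l : List Int) (a : Int),
      l.foldl (fun ans i => if i == k then g i else ans) a = if k ∈ l then g k else a := by
  intro l
  induction l with
  | nil => intro a; simp
  | cons x t ih =>
    intro a
    rw [List.foldl_cons, ih]
    by_cases hx : x = k
    · subst hx; simp
    · simp [hx, Ne.symm hx]

-- s.find(c) for a single character c is the first index of c, or -1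
theorem find_go_single (c : Char) :
    ∀ (s : List Char) (j : Nat),
      PySem.Chars.find.go [c] s j =
        match PySem.List.index? s c with
        | some i => ((j + i : Nat) : Int)
        | none => -1 := by
  intro s
  induction s with
  | nil => intro j; simp [PySem.Chars.find.go, PySem.List.index?_eq_idxOf?, List.idxOf?]
  | cons h t ih =>
    intro j
    rw [PySem.Chars.find.go]
    by_cases hc : h = c
    · subst hc
      rw [PySem.List.index?_cons_self]
      simp [List.isPrefixOf]
    · rw [PySem.List.index?_cons_of_ne t hc]
      have hpre : [c].isPrefixOf (h :: t) = false := by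
        simp [List.isPrefixOf, Ne.symm hc]
      rw [hpre]
      simp only [Bool.false_eq_true, if_false, ih (j + 1)]
      cases hidx : PySem.List.index? t c with
      | none => simp
      | some v =>
          simp only [Option.map_some]
          norm_num
          ring

theorem find_single (c : Char) (s : List Char) :
    PySem.Chars.find s [c] =
      match PySem.List.index? s c with
      | some i => (i : Int)
      | none => -1 := by
  have := find_go_single c s 0
  simp only [PySem.Chars.find] at *
  simpa using this

-- first index of k among the digit values = first index of its digit character
theorem index?_map_chVal {k : Int} (hk0 : 0 ≤ k) (hk9 : k ≤ 9) :
    ∀ (s : List Char), (∀ c ∈ s, ∃ d : Nat, d < 10 ∧ c = Nat.digitChar d) →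
      PySem.List.index? (s.map chVal) k = PySem.List.index? s (Nat.digitChar k.toNat) := by
  intro s
  induction s with
  | nil => intro _; rfl
  | cons x t ih =>
    intro h
    obtain ⟨d, hd, rfl⟩ := h x (by simp)
    have ht := ih (fun c hc => h c (by simp [hc]))
    by_cases he : chVal (Nat.digitChar d) = k
    · have hx : Nat.digitChar d = Nat.digitChar k.toNat := (chVal_eq_iff hd hk0 hk9).mp he
      rw [List.map_cons, he, hx, PySem.List.index?_cons_self, PySem.List.index?_cons_self]
    · have hx : Nat.digitChar d ≠ Nat.digitChar k.toNat := fun hh =>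
        he ((chVal_eq_iff hd hk0 hk9).mpr hh)
      rw [List.map_cons, PySem.List.index?_cons_of_ne _ he, PySem.List.index?_cons_of_ne _ hx, ht]

-- every digit value lies in 0..9
theorem mem_map_chVal_bounds {s : List Char}
    (h : ∀ c ∈ s, ∃ d : Nat, d < 10 ∧ c = Nat.digitChar d) :
    ∀ v ∈ s.map chVal, 0 ≤ v ∧ v ≤ 9 := by
  intro v hv
  obtain ⟨c, hc, rfl⟩ := List.mem_map.mp hv
  obtain ⟨d, hd, rfl⟩ := h c hc
  rw [chVal_digitChar hd]
  omega

theorem solution_eq (num k : Int) (hnum : 0 ≤ num) :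
    solution num k = solution_alt num k := by
  have hchars : PySem.Int.toChars num = Nat.toDigits 10 num.toNat := by
    simp [PySem.Int.toChars, not_lt.mpr hnum]
  set s : List Char := Nat.toDigits 10 num.toNat with hs
  have hdig : ∀ c ∈ s, ∃ d : Nat, d < 10 ∧ c = Nat.digitChar d := mem_toDigits_ten _
  have hmap : (PySem.Int.toChars num).mapM (fun c => PySem.Int.ofChars? [c]) = some (s.map chVal) := by
    rw [hchars]
    refine mapM_eq_map _ chVal s ?_
    intro c hc
    obtain ⟨d, hd, rfl⟩ := hdig c hc
    rw [ofChars?_digitChar hd, chVal_digitChar hd]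
  set L : List Int := s.map chVal with hL
  have hA : solution num k =
      (if (if k ∈ L then ((PySem.List.index? L k).getD 0 : Nat) + (1:Int) else 0) == 0 then (-1:Int)
       else if k ∈ L then ((PySem.List.index? L k).getD 0 : Nat) + 1 else 0) := by
    simp only [solution, hmap]
    rw [foldl_last_hit k (fun i => (((PySem.List.index? L i).getD 0 : Nat) : Int) + 1) L 0]
  have hBstr : (PySem.Int.toStr num).toList = s := by
    rw [PySem.Int.toList_toStr, hchars]
  by_cases hk : 0 ≤ k ∧ k ≤ 9
  · -- k a possible digit: both sides follow index? s (digitChar k.toNat)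
    have hkchars : (PySem.Int.toStr k).toList = [Nat.digitChar k.toNat] := by
      rw [PySem.Int.toList_toStr]
      simp [PySem.Int.toChars, not_lt.mpr hk.1]
      exact Nat.toDigits_of_lt_base (by omega)
    have hidx := index?_map_chVal hk.1 hk.2 s hdig
    have hfind : PySem.Str.find (PySem.Int.toStr num) (PySem.Int.toStr k) =
        match PySem.List.index? L k with
        | some i => (i : Int)
        | none => -1 := by
      rw [PySem.Str.find_eq, hBstr, hkchars, find_single, hidx]
    rw [solution_alt, if_pos hk, hA]
    cases hcase : PySem.List.index? L k with
    | none =>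
      have hnot : k ∉ L := (PySem.List.index?_eq_none_iff L k).mp hcase
      simp only [hfind, hcase, if_neg hnot]
      norm_num
    | some i =>
      have hmem : k ∈ L := by
        by_contra hnot
        rw [(PySem.List.index?_eq_none_iff L k).mpr hnot] at hcase
        simp at hcase
      have h2 : (i : Int) ≠ -1 := by omega
      have h1 : ¬ (((i : Int) + 1 == 0) = true) := by simp; omega
      simp only [hfind, hcase, if_pos hmem, Option.getD_some]
      simp [h1, h2]
  · -- k can never be a digit: A's test never fires, B short-circuits
    have hnot : k ∉ L := fun hmem => hk ⟨(mem_map_chVal_bounds hdig k hmem).1,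
      (mem_map_chVal_bounds hdig k hmem).2⟩
    rw [solution_alt, if_neg hk, hA, if_neg hnot]
    norm_num

-- ===== VERDICT (by name: the statement is the Claim_ definition above) =====
theorem solution_spec : Claim_equal_solution := by
  intro num k _ hpre
  unfold Spec_solution
  exact solution_eq num k hpre
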